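-- pv_equiv track=rewrite | github.com/NUSTM/COQE | multi_stage_approach/data_utils/shared_utils.py | predicate_convert_to_index_col
-- ===== SOURCE A (Python) =====
-- def predicate_convert_to_index_col(label_col):
--     """
--     :param label_col: a list of [elem dict]. elem_dict: {elem: {s_index: length}}
--     :return: a list of [(s_index, e_index)]
--     """
--     predicate_index_col = []
--
--     for index in range(len(label_col)):
--         each_sent_index_col = []
--         for pair_index in range(len(label_col[index])):
--             elem_dict = label_col[index][pair_index]['predicate']
--
--             assert len(elem_dict) <= 2, "predicate data error"
--
--             predicate_index = None
--             for s_index, length in elem_dict.items():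
--                 cur_predicate_index = (s_index, s_index + length)
--
--                 if predicate_index is None:
--                     predicate_index = cur_predicate_index
--                 else:
--                     if cur_predicate_index[0] < predicate_index[0]:
--                         predicate_index = cur_predicate_index + predicate_index
--                     else:
--                         predicate_index = predicate_index + cur_predicate_index
--
--             if predicate_index is not None:
--                 each_sent_index_col.append(predicate_index)
--
--         predicate_index_col.append(each_sent_index_col)
--
--     return predicate_index_col
-- ===== SOURCE B (Python) =====
-- def _pair_tuple(elem_dict):
--     assert len(elem_dict) <= 2, "predicate data error"
--     spans = [(s, s + length) for s, length in elem_dict.items()]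
--     if not spans:
--         return None
--     lead = min(spans, key=lambda t: t[0])
--     rest = list(spans)
--     rest.remove(lead)
--     return lead + sum(rest, ())
--
--
-- def predicate_convert_to_index_col(label_col):
--     """
--     :param label_col: a list of [elem dict]. elem_dict: {elem: {s_index: length}}
--     :return: a list of [(s_index, e_index)]
--     """
--     buckets = [[] for _ in label_col]
--     records = [(i, pair['predicate'])
--                for i, sent in enumerate(label_col) for pair in sent]
--     for i, elem_dict in records:
--         t = _pair_tuple(elem_dict)
--         if t is not None:
--             buckets[i].append(t)
--     return buckets
-- ===== Notes on version B (the rewrite author's own statement) =====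
-- stated objective: alternative
-- what changed: B flattens the nested structure into one tagged record stream ((sentence index, predicate dict) pairs) and distributes results into pre-allocated per-sentence buckets in a single pass, and per pair replaces A's None-accumulator comparison loop by min-selection (first minimal start) plus remove and tuple concatenation.
import Mathlib
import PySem

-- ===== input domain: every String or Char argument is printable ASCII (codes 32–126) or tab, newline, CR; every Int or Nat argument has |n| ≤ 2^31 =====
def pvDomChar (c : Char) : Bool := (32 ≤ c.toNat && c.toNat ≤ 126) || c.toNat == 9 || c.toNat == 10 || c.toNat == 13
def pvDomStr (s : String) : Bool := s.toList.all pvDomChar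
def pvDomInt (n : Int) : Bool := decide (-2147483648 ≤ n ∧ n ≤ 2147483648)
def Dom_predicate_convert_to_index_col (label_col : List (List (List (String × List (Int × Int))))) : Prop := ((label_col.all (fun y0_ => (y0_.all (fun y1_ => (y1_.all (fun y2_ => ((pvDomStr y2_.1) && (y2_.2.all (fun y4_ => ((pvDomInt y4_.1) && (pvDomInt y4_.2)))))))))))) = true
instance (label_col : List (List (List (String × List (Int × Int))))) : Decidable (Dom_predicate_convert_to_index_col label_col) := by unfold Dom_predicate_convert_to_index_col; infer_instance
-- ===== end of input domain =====

-- B flattens the input into one (sentence-index, predicate-dict) record stream and distributes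
-- results into pre-allocated per-sentence buckets; per pair it uses min-selection + remove
-- instead of A's None-accumulator comparison loop. Same values everywhere on Pre_.


-- ===== PORT A =====
-- the 'for s_index, length in elem_dict.items()' loop with the None/compare accumulator;
-- tuples of ints become List Int; pi.headD 0 is pi[0] (pi is never empty when read)
def pvA_pair (items : List (Int × Int)) : Option (List Int) :=
  items.foldl
    (fun acc p =>
      let cur : List Int := [p.1, p.1 + p.2]
      match acc with
      | none => some cur
      | some pi => if p.1 < pi.headD 0 then some (cur ++ pi) else some (pi ++ cur))
    none

def predicate_convert_to_index_col (label_col : List (List (List (String × List (Int × Int))))) : List (List (List Int)) :=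
  label_col.foldl
    (fun out sent =>
      out ++ [sent.foldl
        (fun col pair =>
          match (PySem.Dict.ofList pair).get? "predicate" with
          | none => col  -- KeyError in Python; excluded by Pre_
          | some elem =>
            if (PySem.Dict.ofList elem).size ≤ 2 then
              match pvA_pair (PySem.Dict.ofList elem).items with
              | none => col
              | some pi => col ++ [pi]
            else col)  -- AssertionError in Python; excluded by Pre_
        []])
    []

-- ===== PORT B =====
-- _pair_tuple: spans, min by start (first minimal), remove it, lead + flattened rest;
-- min? is none exactly when spans is empty (Python's 'if not spans: return None');
-- remove? always succeeds since lead ∈ spans (getD [] is never the fallback there)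
def pvB_pair (elem : List (Int × Int)) : Option (List Int) :=
  let spans := (PySem.Dict.ofList elem).items.map (fun p => (p.1, p.1 + p.2))
  match PySem.List.min? spans (fun t => t.1) with
  | none => none
  | some lead =>
    let rest := (PySem.List.remove? spans lead).getD []
    some ([lead.1, lead.2] ++ rest.flatMap (fun t => [t.1, t.2]))
    -- the assert raises outside Pre_; nothing to port there

def predicate_convert_to_index_col_alt (label_col : List (List (List (String × List (Int × Int))))) : List (List (List Int)) :=
  let buckets : List (List (List Int)) := label_col.map (fun _ => [])
  let records : List (Int × List (Int × Int)) :=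
    (PySem.List.enumerate label_col).flatMap
      (fun p => p.2.map (fun pair => (p.1, ((PySem.Dict.ofList pair).get? "predicate").getD [])))
  records.foldl
    (fun bs r =>
      match pvB_pair r.2 with
      | none => bs
      | some t => bs.modify r.1.toNat (fun col => col ++ [t]))  -- buckets[i].append(t); i ≥ 0 from enumerate
    buckets

-- ===== PRECONDITION & SPEC =====
-- Pre_ excludes exactly the inputs where the Python raises: a pair without the key
-- 'predicate' (KeyError) or whose predicate dict has more than 2 entries (AssertionError).
def Pre_predicate_convert_to_index_col (label_col : List (List (List (String × List (Int × Int))))) : Prop :=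
  (label_col.all (fun sent => sent.all (fun pair =>
    match (PySem.Dict.ofList pair).get? "predicate" with
    | some elem => (PySem.Dict.ofList elem).size ≤ 2
    | none => false))) = true
instance (label_col : List (List (List (String × List (Int × Int))))) : Decidable (Pre_predicate_convert_to_index_col label_col) := by unfold Pre_predicate_convert_to_index_col; infer_instance

def pvWitness_predicate_convert_to_index_col : (List (List (List (String × List (Int × Int))))) :=
  [[[("predicate", [(3, 2), (0, 1)])], [("predicate", [])]], []]

def Spec_predicate_convert_to_index_col (label_col : List (List (List (String × List (Int × Int))))) (out : List (List (List Int))) : Prop := out = predicate_convert_to_index_col_alt label_col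
instance (label_col : List (List (List (String × List (Int × Int))))) (out : List (List (List Int))) : Decidable (Spec_predicate_convert_to_index_col label_col out) := by unfold Spec_predicate_convert_to_index_col; infer_instance

-- ===== CLAIM (what is proved, stated in full; the proofs are below) =====
def Claim_equal_predicate_convert_to_index_col : Prop := ∀ (label_col : List (List (List (String × List (Int × Int))))), Dom_predicate_convert_to_index_col label_col → Pre_predicate_convert_to_index_col label_col → Spec_predicate_convert_to_index_col label_col (predicate_convert_to_index_col label_col)

-- ===== LEMMAS AND PROOFS =====

-- the record-processing step of B's fold, named for the proofs
def pvStep (bs : List (List (List Int))) (r : Int × List (Int × Int)) : List (List (List Int)) :=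
  match pvB_pair r.2 with
  | none => bs
  | some t => bs.modify r.1.toNat (fun col => col ++ [t])

-- the per-pair elem dict B extracts from a pair
def pvElemOf (pair : List (String × List (Int × Int))) : List (Int × Int) :=
  ((PySem.Dict.ofList pair).get? "predicate").getD []

-- per-sentence output, shared normal form of both sides
def pvSentOut (sent : List (List (String × List (Int × Int)))) : List (List Int) :=
  sent.filterMap (fun pair => pvB_pair (pvElemOf pair))

-- per-pair: A's accumulator loop on ≤ 2 items equals B's min/remove/concat
theorem pvAB_pair (elem : List (Int × Int))
    (h : (PySem.Dict.ofList elem).items.length ≤ 2) :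
    pvA_pair (PySem.Dict.ofList elem).items = pvB_pair elem := by
  unfold pvB_pair
  match hm : (PySem.Dict.ofList elem).items, h with
  | [], _ => rfl
  | [a], _ =>
    simp [pvA_pair, PySem.List.min?, PySem.List.remove?, List.idxOf?]
  | [a, b], _ =>
    by_cases hlt : b.1 < a.1
    · have hne : ((a.1, a.1 + a.2) == (b.1, b.1 + b.2)) = false := by
        simp only [beq_eq_false_iff_ne, ne_eq, Prod.mk.injEq, not_and]
        intro h'; omega
      simp [pvA_pair, PySem.List.min?, PySem.List.remove?, List.idxOf?, hlt, hne,
        List.findIdx?_cons, List.eraseIdx]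
    · simp [pvA_pair, PySem.List.min?, PySem.List.remove?, List.idxOf?, hlt,
        List.findIdx?_cons, List.eraseIdx]

-- modify twice at the same index composes
theorem pv_modify_modify {α : Type} (l : List α) (k : Nat) (f g : α → α) :
    (l.modify k f).modify k g = l.modify k (fun x => g (f x)) := by
  induction l generalizing k with
  | nil => simp [List.modify_nil]
  | cons x t ih =>
    cases k with
    | zero => simp [List.modify]
    | succ n => simp [List.modify_succ_cons, ih]

-- modify at the length of a prefix hits the head of the suffix
theorem pv_modify_append {α : Type} (pre : List α) (x : α) (l : List α) (f : α → α) :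
    (pre ++ x :: l).modify pre.length f = pre ++ f x :: l := by
  induction pre with
  | nil => simp [List.modify]
  | cons y t ih => simp [List.modify_succ_cons, ih]

-- folding the records of one sentence (all tagged with index k) appends its outputs to bucket k
theorem pv_fold_sent (sent : List (List (String × List (Int × Int)))) (k : Nat)
    (bs : List (List (List Int))) :
    (sent.map (fun pair => ((k : Int), pvElemOf pair))).foldl pvStep bs
      = bs.modify k (fun col => col ++ pvSentOut sent) := by
  induction sent generalizing bs with
  | nil =>
    simp only [List.map_nil, List.foldl_nil, pvSentOut, List.filterMap_nil, List.append_nil]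
    exact (List.modify_id k bs).symm
  | cons pair rest ih =>
    simp only [List.map_cons, List.foldl_cons]
    cases hp : pvB_pair (pvElemOf pair) with
    | none =>
      have hs : pvStep bs ((k : Int), pvElemOf pair) = bs := by simp [pvStep, hp]
      rw [hs, ih]
      simp [pvSentOut, hp]
    | some t =>
      have hs : pvStep bs ((k : Int), pvElemOf pair)
          = bs.modify k (fun col => col ++ [t]) := by
        simp [pvStep, hp]
      rw [hs, ih, pv_modify_modify]
      simp [pvSentOut, hp]

-- the whole record stream, started after a finished prefix of buckets
theorem pv_fold_all (sents : List (List (List (String × List (Int × Int)))))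
    (pre : List (List (List Int))) :
    ((PySem.List.enumerate sents (pre.length : Int)).flatMap
        (fun p => p.2.map (fun pair => (p.1, pvElemOf pair)))).foldl pvStep
      (pre ++ sents.map (fun _ => ([] : List (List Int))))
      = pre ++ sents.map pvSentOut := by
  induction sents generalizing pre with
  | nil => simp [PySem.List.enumerate]
  | cons s rest ih =>
    rw [PySem.List.enumerate_cons]
    simp only [List.flatMap_cons, List.foldl_append, List.map_cons]
    rw [pv_fold_sent s pre.length]
    rw [pv_modify_append]
    have h2 : ((pre.length : Int) + 1) = (((pre ++ [pvSentOut s]).length : Int)) := by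
      simp
    rw [h2]
    have h3 : pre ++ (([] : List (List Int)) ++ pvSentOut s) :: rest.map (fun _ => ([] : List (List Int)))
        = (pre ++ [pvSentOut s]) ++ rest.map (fun _ => ([] : List (List Int))) := by
      simp
    rw [h3, ih (pre ++ [pvSentOut s])]
    simp

-- per-sentence: A's inner append loop equals the shared normal form
theorem pvA_sent (sent : List (List (String × List (Int × Int))))
    (h : ∀ pair ∈ sent,
      match (PySem.Dict.ofList pair).get? "predicate" with
      | some elem => (PySem.Dict.ofList elem).size ≤ 2
      | none => False)
    (col : List (List Int)) :
    sent.foldl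
      (fun col pair =>
        match (PySem.Dict.ofList pair).get? "predicate" with
        | none => col
        | some elem =>
          if (PySem.Dict.ofList elem).size ≤ 2 then
            match pvA_pair (PySem.Dict.ofList elem).items with
            | none => col
            | some pi => col ++ [pi]
          else col)
      col
    = col ++ pvSentOut sent := by
  induction sent generalizing col with
  | nil => simp [pvSentOut]
  | cons pair rest ih =>
    have hp := h pair (by simp)
    have hrest : ∀ p ∈ rest, match (PySem.Dict.ofList p).get? "predicate" with
        | some elem => (PySem.Dict.ofList elem).size ≤ 2
        | none => False := fun p hm => h p (by simp [hm])
    cases hget : (PySem.Dict.ofList pair).get? "predicate" with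
    | none => rw [hget] at hp; exact absurd hp (by simp)
    | some elem =>
      rw [hget] at hp
      simp only [List.foldl_cons, hget]
      rw [if_pos hp, pvAB_pair elem hp, ih hrest]
      have he : pvElemOf pair = elem := by simp [pvElemOf, hget]
      cases hb : pvB_pair elem with
      | none => simp [pvSentOut, he, hb]
      | some t => simp [pvSentOut, he, hb]

-- ===== VERDICT (by name: the statement is the Claim_ definition above) =====
theorem predicate_convert_to_index_col_spec : Claim_equal_predicate_convert_to_index_col := by
  intro label_col _ hpre
  unfold Spec_predicate_convert_to_index_col predicate_convert_to_index_col
    predicate_convert_to_index_col_alt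
  rw [PySem.List.foldl_append_singleton_eq_map]
  simp only [List.nil_append]
  have hb : (PySem.List.enumerate label_col).flatMap
        (fun p => p.2.map (fun pair => (p.1, ((PySem.Dict.ofList pair).get? "predicate").getD [])))
      = (PySem.List.enumerate label_col (( ([] : List (List (List Int))).length : Int))).flatMap
        (fun p => p.2.map (fun pair => (p.1, pvElemOf pair))) := by
    rfl
  rw [hb]
  have := pv_fold_all label_col ([] : List (List (List Int)))
  simp only [List.nil_append] at this
  rw [show (fun bs (r : Int × List (Int × Int)) =>
        match pvB_pair r.2 with
        | none => bs
        | some t => bs.modify r.1.toNat (fun col => col ++ [t])) = pvStep from rfl]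
  rw [this]
  apply List.map_congr_left
  intro sent hsent
  apply pvA_sent
  intro pair hpair
  unfold Pre_predicate_convert_to_index_col at hpre
  simp only [List.all_eq_true] at hpre
  have := hpre sent hsent pair hpair
  cases hget : (PySem.Dict.ofList pair).get? "predicate" <;> rw [hget] at this <;> simp_all
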